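-- pv_equiv track=rewrite | github.com/Agususuariodegit/Algoritmos | guia7.py | filas_ordenadas
-- ===== SOURCE A (Python) =====
-- def ordenados(lista: list[int]) -> bool:
--     i:int = 0
--     res:bool = True
--     while (i < len(lista) - 1):
--         if (lista[i] <= lista[i + 1]):
--             i += 1
--         else:
--             res = False
--             i += 1
--     return res
--
-- def filas_ordenadas(lista: list[list [int]]) -> list[bool]:
--     ordenes = []
--     for i in range(0,len(lista),1):
--         if(ordenados(lista[i]) == True):
--             ordenes += [True]
--         else:
--             ordenes += [False]
--     return ordenes
-- ===== SOURCE B (Python) =====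
-- def filas_ordenadas(lista: list[list[int]]) -> list[bool]:
--     return [sorted(fila) == fila for fila in lista]
-- ===== Notes on version B (the rewrite author's own statement) =====
-- stated objective: idiomatic
-- what changed: Replaces the index-driven while-loop adjacent-pair scan (continuing to the end even after a violation) with a one-line comprehension comparing each row to its sorted copy.
import Mathlib
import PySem

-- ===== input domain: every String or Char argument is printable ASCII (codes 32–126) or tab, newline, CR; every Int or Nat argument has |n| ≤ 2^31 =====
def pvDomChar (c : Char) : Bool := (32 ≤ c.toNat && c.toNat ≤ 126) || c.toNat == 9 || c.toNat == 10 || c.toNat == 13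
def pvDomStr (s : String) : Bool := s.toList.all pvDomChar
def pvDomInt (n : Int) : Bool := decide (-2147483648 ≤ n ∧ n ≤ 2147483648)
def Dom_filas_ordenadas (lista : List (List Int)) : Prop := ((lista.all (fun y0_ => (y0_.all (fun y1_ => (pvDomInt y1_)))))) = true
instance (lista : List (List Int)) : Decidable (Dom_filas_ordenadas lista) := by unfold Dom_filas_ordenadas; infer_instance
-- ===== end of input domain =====

-- B replaces A's index-driven adjacent-pair while-loop with a comprehension comparing each row to its sorted copy (idiomatic).

-- ===== PORT A =====
-- while (i < len(lista) - 1): compare lista[i], lista[i+1]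
def ordenadosLoop (lista : List Int) (i : Int) (res : Bool) : Bool :=
  if h : i < (lista.length : Int) - 1 then
    if PySem.List.pyGetD lista i 0 ≤ PySem.List.pyGetD lista (i + 1) 0 then
      ordenadosLoop lista (i + 1) res
    else
      ordenadosLoop lista (i + 1) false
  else res
termination_by ((lista.length : Int) - 1 - i).toNat
decreasing_by all_goals omega

def ordenados (lista : List Int) : Bool := ordenadosLoop lista 0 true

def filas_ordenadas (lista : List (List Int)) : List Bool :=
  (PySem.List.pyRange 0 (lista.length : Int) 1).foldl
    (fun ordenes i =>
      if ordenados (PySem.List.pyGetD lista i []) = true then ordenes ++ [true]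
      else ordenes ++ [false]) []

-- ===== PORT B =====
def filas_ordenadas_alt (lista : List (List Int)) : List Bool :=
  lista.map (fun fila => PySem.List.sorted fila (fun x => x) == fila)

-- ===== PRECONDITION & SPEC =====
def Spec_filas_ordenadas (lista : List (List Int)) (out : List Bool) : Prop := out = filas_ordenadas_alt lista
instance (lista : List (List Int)) (out : List Bool) : Decidable (Spec_filas_ordenadas lista out) := by unfold Spec_filas_ordenadas; infer_instance

-- ===== CLAIM (what is proved, stated in full; the proofs are below) =====
def Claim_equal_filas_ordenadas : Prop := ∀ (lista : List (List Int)), Dom_filas_ordenadas lista → Spec_filas_ordenadas lista (filas_ordenadas lista)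

-- ===== LEMMAS AND PROOFS =====

theorem ordenadosLoop_eq_chain (lista : List Int) (n : Nat) (res : Bool) :
    ordenadosLoop lista (n : Int) res = (res && decide ((lista.drop n).IsChain (· ≤ ·))) := by
  by_cases h : n + 1 < lista.length
  · have hd : lista.drop n = lista[n] :: lista[n+1] :: lista.drop (n + 2) := by
      rw [List.drop_eq_getElem_cons (by omega), List.drop_eq_getElem_cons (h := by omega)]
    have hg1 : PySem.List.pyGetD lista (n : Int) 0 = lista[n] := by
      rw [PySem.List.pyGetD_natCast, List.getD_eq_getElem lista 0 (by omega)]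
    have hg2 : PySem.List.pyGetD lista ((n : Int) + 1) 0 = lista[n+1] := by
      have hc : ((n : Int) + 1) = ((n + 1 : Nat) : Int) := by push_cast; ring
      rw [hc, PySem.List.pyGetD_natCast, List.getD_eq_getElem lista 0 (by omega)]
    have hih := ordenadosLoop_eq_chain lista (n + 1) res
    have hihf := ordenadosLoop_eq_chain lista (n + 1) false
    have hd' : lista.drop (n + 1) = lista[n+1] :: lista.drop (n + 2) := by
      rw [List.drop_eq_getElem_cons (h := by omega)]
    rw [ordenadosLoop]
    have hc : (n : Int) < (lista.length : Int) - 1 := by omega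
    rw [dif_pos hc, hg1, hg2]
    have hcast : (n : Int) + 1 = ((n + 1 : Nat) : Int) := by push_cast; ring
    by_cases hle : lista[n] ≤ lista[n+1]
    · rw [if_pos hle, hcast, hih]
      have hiff : List.IsChain (α := Int) (· ≤ ·) (lista.drop (n+1)) ↔ List.IsChain (· ≤ ·) (lista.drop n) := by
        rw [hd, hd', List.isChain_cons_cons]; exact (and_iff_right hle).symm
      exact congrArg (res && ·) (decide_eq_decide.mpr hiff)
    · rw [if_neg hle, hcast, hihf]
      have hnot : ¬ List.IsChain (α := Int) (· ≤ ·) (lista.drop n) := by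
        rw [hd, List.isChain_cons_cons]; exact fun hch => hle hch.1
      simp [hnot]
  · rw [ordenadosLoop]
    have hc : ¬ ((n : Int) < (lista.length : Int) - 1) := by omega
    rw [dif_neg hc]
    have hch : (lista.drop n).IsChain (· ≤ ·) := by
      rcases Nat.lt_or_ge n lista.length with h1 | h1
      · have h2 : lista.drop n = [lista[n]] := by
          rw [List.drop_eq_getElem_cons (by omega)]
          rw [List.drop_eq_nil_of_le (by omega)]
        rw [h2]; simp
      · rw [List.drop_eq_nil_of_le h1]; simp
    simp [hch]
termination_by lista.length - n
decreasing_by all_goals omega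

theorem ordenados_eq_sorted (fila : List Int) :
    ordenados fila = (PySem.List.sorted fila (fun x => x) == fila) := by
  have h1 : ordenados fila = decide (fila.IsChain (· ≤ ·)) := by
    simpa [ordenados] using ordenadosLoop_eq_chain fila 0 true
  rw [h1]
  by_cases h : fila.IsChain (· ≤ ·)
  · have hp : fila.Pairwise (fun a b => a ≤ b) := List.isChain_iff_pairwise.mp h
    have heq := PySem.List.sorted_eq_self_of_pairwise fila (fun x => x) hp
    simp [heq, h]
  · have hne : PySem.List.sorted fila (fun x => x) ≠ fila := by
      intro heq
      apply h
      apply List.isChain_iff_pairwise.mpr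
      have hpw := PySem.List.sorted_pairwise fila (fun x => x)
      rw [heq] at hpw
      exact hpw
    simp [h, hne]

-- ===== VERDICT (by name: the statement is the Claim_ definition above) =====
theorem filas_ordenadas_spec : Claim_equal_filas_ordenadas := by
  intro lista _
  unfold Spec_filas_ordenadas filas_ordenadas filas_ordenadas_alt
  have hstep : (fun (ordenes : List Bool) (x : List Int) =>
      if ordenados x = true then ordenes ++ [true] else ordenes ++ [false])
      = fun ordenes x => ordenes ++ [ordenados x] := by
    funext ordenes x
    by_cases h : ordenados x = true <;> simp [h]
  calc (PySem.List.pyRange 0 (lista.length : Int) 1).foldl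
        (fun ordenes i =>
          if ordenados (PySem.List.pyGetD lista i []) = true then ordenes ++ [true]
          else ordenes ++ [false]) []
      = lista.foldl (fun ordenes x =>
          if ordenados x = true then ordenes ++ [true] else ordenes ++ [false]) [] :=
        PySem.List.foldl_pyRange_zero_pyGetD lista []
          (fun ordenes x => if ordenados x = true then ordenes ++ [true] else ordenes ++ [false]) []
    _ = lista.map (fun x => ordenados x) := by
        rw [hstep]; exact PySem.List.foldl_append_singleton_eq_map _ lista []
    _ = lista.map (fun fila => PySem.List.sorted fila (fun x => x) == fila) := by
        simp only [ordenados_eq_sorted]
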